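-- pv_equiv track=rewrite | github.com/amboka/RaceAnalytics | backend/telemetry/systems/breaks/transition.py | _fill_small_gaps
-- ===== SOURCE A (Python) =====
-- def _fill_small_gaps(active: list[bool], max_gap_points: int) -> list[bool]:
--     if not active:
--         return []
--
--     filled = active[:]
--     index = 0
--     while index < len(filled):
--         if filled[index]:
--             index += 1
--             continue
--
--         gap_start = index
--         while index < len(filled) and not filled[index]:
--             index += 1
--         gap_end = index - 1
--
--         left_active = gap_start > 0 and filled[gap_start - 1]
--         right_active = index < len(filled) and filled[index]
--         gap_size = gap_end - gap_start + 1
--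
--         if left_active and right_active and gap_size <= max_gap_points:
--             for patch_idx in range(gap_start, gap_end + 1):
--                 filled[patch_idx] = True
--
--     return filled
-- ===== SOURCE B (Python) =====
-- def _fill_small_gaps(active: list[bool], max_gap_points: int) -> list[bool]:
--     # Landmark-pair approach: collect the positions of active samples once,
--     # then fill the gap between each consecutive pair when it is small enough.
--     active_idx = [i for i, v in enumerate(active) if v]
--     filled = list(active)
--     for i, j in zip(active_idx, active_idx[1:]):
--         gap = j - i - 1
--         if 0 < gap <= max_gap_points:
--             filled[i + 1:j] = [True] * gap
--     return filled
-- ===== Notes on version B (the rewrite author's own statement) =====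
-- stated objective: alternative
-- what changed: Replaces A's index-walking while-loop with nested gap scan and in-place patch loop by a single pass over consecutive pairs of precomputed active positions, filling each small gap with one slice assignment.
import Mathlib
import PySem

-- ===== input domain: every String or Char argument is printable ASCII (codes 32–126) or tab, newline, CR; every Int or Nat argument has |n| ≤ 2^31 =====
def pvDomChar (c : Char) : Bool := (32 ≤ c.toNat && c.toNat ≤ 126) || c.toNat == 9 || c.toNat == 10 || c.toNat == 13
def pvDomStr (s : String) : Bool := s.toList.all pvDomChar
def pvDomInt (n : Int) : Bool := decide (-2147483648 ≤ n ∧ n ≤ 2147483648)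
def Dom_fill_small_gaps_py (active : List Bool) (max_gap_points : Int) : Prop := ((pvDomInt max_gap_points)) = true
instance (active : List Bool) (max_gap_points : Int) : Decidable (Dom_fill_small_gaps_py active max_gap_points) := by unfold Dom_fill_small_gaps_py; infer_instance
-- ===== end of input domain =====

-- B replaces A's index-walking gap scan by one pass over consecutive pairs of precomputed
-- active positions (objective: alternative decomposition, no speed claim). Return value only;
-- neither version mutates its argument.

-- ===== PORT A =====

-- inner `while index < len(filled) and not filled[index]: index += 1`
def pvScanGap (filled : List Bool) (index : Nat) : Nat :=
  if index < filled.length && !(filled.getD index false) then pvScanGap filled (index + 1)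
  else index
termination_by filled.length - index
decreasing_by
  rename_i h; simp only [Bool.and_eq_true, decide_eq_true_eq] at h; omega

-- (termination helpers for the outer loop, cited in its decreasing_by)
theorem pvScanGap_ge (filled : List Bool) (index : Nat) : index ≤ pvScanGap filled index := by
  rw [pvScanGap]
  split
  · have := pvScanGap_ge filled (index + 1); omega
  · exact Nat.le_refl _
termination_by filled.length - index
decreasing_by
  rename_i h; simp only [Bool.and_eq_true, decide_eq_true_eq] at h; omega

theorem pvScanGap_lt (filled : List Bool) (index : Nat) (h : index < filled.length)
    (hf : filled.getD index false = false) : index < pvScanGap filled index := by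
  rw [pvScanGap]
  have hc : (index < filled.length && !(filled.getD index false)) = true := by
    simp only [hf, Bool.not_false, Bool.and_true, decide_eq_true_eq]; exact h
  rw [if_pos hc]
  have := pvScanGap_ge filled (index + 1); omega

theorem pvLenFoldlSet (ks : List Nat) (l : List Bool) :
    (ks.foldl (fun l k => l.set k true) l).length = l.length := by
  induction ks generalizing l with
  | nil => rfl
  | cons k ks ih => simp [List.foldl_cons, ih]

-- outer `while index < len(filled)` loop; `filled` is the mutable copy
def pvLoopA (mgp : Int) (filled : List Bool) (index : Nat) : List Bool :=
  if h : index < filled.length then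
    if filled.getD index false then pvLoopA mgp filled (index + 1)
    else
      let gap_start := index
      let index2 := pvScanGap filled index
      let gap_end := index2 - 1               -- index2 ≥ index + 1 here, so Nat `- 1` = Python's
      let left_active := decide (gap_start > 0) && filled.getD (gap_start - 1) false
      let right_active := decide (index2 < filled.length) && filled.getD index2 false
      let gap_size := gap_end - gap_start + 1 -- = Python's gap_size (gap_end ≥ gap_start)
      let filled' :=
        if left_active && right_active && decide ((gap_size : Int) ≤ mgp) then
          -- `for patch_idx in range(gap_start, gap_end + 1): filled[patch_idx] = True`
          (List.range' gap_start gap_size).foldl (fun l k => l.set k true) filled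
        else filled
      pvLoopA mgp filled' index2
  else filled
termination_by filled.length - index
decreasing_by
  · omega
  · rename_i hf
    have h1 : index < pvScanGap filled index :=
      pvScanGap_lt filled index h (by simpa using hf)
    split
    · rw [pvLenFoldlSet]; omega
    · omega

def fill_small_gaps_py (active : List Bool) (max_gap_points : Int) : List Bool :=
  if active = [] then []
  else pvLoopA max_gap_points active 0

-- ===== PORT B =====

def fill_small_gaps_py_alt (active : List Bool) (max_gap_points : Int) : List Bool :=
  -- active_idx = [i for i, v in enumerate(active) if v]
  let active_idx : List Int := ((PySem.List.enumerate active).filter (fun p => p.2)).map (fun p => p.1)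
  -- for i, j in zip(active_idx, active_idx[1:]): …
  (active_idx.zip active_idx.tail).foldl
    (fun filled p =>
      let gap : Int := p.2 - p.1 - 1
      if 0 < gap ∧ gap ≤ max_gap_points then
        -- filled[i+1:j] = [True] * gap   (0 ≤ i < j ≤ len, so .toNat is exact here)
        filled.take (p.1 + 1).toNat ++ List.replicate gap.toNat true ++ filled.drop p.2.toNat
      else filled)
    active

-- ===== PRECONDITION & SPEC =====
def Spec_fill_small_gaps_py (active : List Bool) (max_gap_points : Int) (out : List Bool) : Prop := out = fill_small_gaps_py_alt active max_gap_points
instance (active : List Bool) (max_gap_points : Int) (out : List Bool) : Decidable (Spec_fill_small_gaps_py active max_gap_points out) := by unfold Spec_fill_small_gaps_py; infer_instance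

-- ===== CLAIM (what is proved, stated in full; the proofs are below) =====
def Claim_equal_fill_small_gaps_py : Prop := ∀ (active : List Bool) (max_gap_points : Int), Dom_fill_small_gaps_py active max_gap_points → Spec_fill_small_gaps_py active max_gap_points (fill_small_gaps_py active max_gap_points)

-- ===== LEMMAS AND PROOFS =====

-- length of the leading run of `false`s
def pvCountF : List Bool → Nat
  | false :: xs => pvCountF xs + 1
  | _ => 0

theorem pvCountF_le (l : List Bool) : pvCountF l ≤ l.length := by
  induction l with
  | nil => simp [pvCountF]
  | cons b xs ih => cases b <;> simp [pvCountF] <;> omega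

-- reference function: process the list run by run, threading whether the previous element is active
def pvRefFill (mgp : Int) : Bool → List Bool → List Bool
  | _, [] => []
  | _, true :: xs => true :: pvRefFill mgp true xs
  | prev, false :: xs =>
      let k := pvCountF (false :: xs)
      let rest := (false :: xs).drop k
      if prev && !rest.isEmpty && decide ((k : Int) ≤ mgp) then
        List.replicate k true ++ pvRefFill mgp true rest
      else
        List.replicate k false ++ pvRefFill mgp false rest
termination_by _ l => l.length
decreasing_by
  all_goals simp only [List.length_drop, pvCountF, List.length_cons]
  all_goals omega

theorem pvRefFill_nil (mgp : Int) (b : Bool) : pvRefFill mgp b [] = [] := by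
  cases b <;> rw [pvRefFill]

theorem pvRefFill_true_cons (mgp : Int) (b : Bool) (xs : List Bool) :
    pvRefFill mgp b (true :: xs) = true :: pvRefFill mgp true xs := by
  cases b <;> rw [pvRefFill]

theorem pvRefFill_false_cons (mgp : Int) (prev : Bool) (xs : List Bool) :
    pvRefFill mgp prev (false :: xs) =
      if prev && !((false :: xs).drop (pvCountF (false :: xs))).isEmpty
            && decide ((pvCountF (false :: xs) : Int) ≤ mgp) then
        List.replicate (pvCountF (false :: xs)) true
          ++ pvRefFill mgp true ((false :: xs).drop (pvCountF (false :: xs)))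
      else
        List.replicate (pvCountF (false :: xs)) false
          ++ pvRefFill mgp false ((false :: xs).drop (pvCountF (false :: xs))) := by
  cases prev <;> rw [pvRefFill]

theorem pv_run_decomp (l : List Bool) :
    l = List.replicate (pvCountF l) false ++ l.drop (pvCountF l) := by
  induction l with
  | nil => rfl
  | cons b xs ih =>
    cases b
    · simp only [pvCountF, List.replicate_succ, List.cons_append, List.drop_succ_cons]
      exact congrArg (false :: ·) ih
    · rfl

theorem pv_rest_head (l : List Bool) :
    l.drop (pvCountF l) = [] ∨ ∃ t, l.drop (pvCountF l) = true :: t := by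
  induction l with
  | nil => left; rfl
  | cons b xs ih =>
    cases b
    · simpa [pvCountF] using ih
    · right; exact ⟨xs, rfl⟩

theorem pvCountF_replicate_append (k : Nat) (rest : List Bool)
    (hr : rest = [] ∨ ∃ t, rest = true :: t) :
    pvCountF (List.replicate k false ++ rest) = k := by
  induction k with
  | zero =>
    rcases hr with h | ⟨t, h⟩ <;> simp [h, pvCountF]
  | succ k ih => simpa [List.replicate_succ, pvCountF] using ih

theorem pvRefFill_run (mgp : Int) (prev : Bool) (k : Nat) (rest : List Bool)
    (hk : 1 ≤ k) (hr : rest = [] ∨ ∃ t, rest = true :: t) :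
    pvRefFill mgp prev (List.replicate k false ++ rest) =
      if prev && !rest.isEmpty && decide ((k : Int) ≤ mgp) then
        List.replicate k true ++ pvRefFill mgp true rest
      else
        List.replicate k false ++ pvRefFill mgp false rest := by
  obtain ⟨k, rfl⟩ : ∃ m, k = m + 1 := ⟨k - 1, by omega⟩
  have hcons : List.replicate (k + 1) false ++ rest
      = false :: (List.replicate k false ++ rest) := by
    simp [List.replicate_succ]
  have hcf : pvCountF (false :: (List.replicate k false ++ rest)) = k + 1 := by
    rw [← hcons, pvCountF_replicate_append _ _ hr]
  have hdrop : (false :: (List.replicate k false ++ rest)).drop (k + 1) = rest := by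
    simpa using List.drop_left' (l₁ := List.replicate (k + 1) false) (l₂ := rest)
      (by simp)
  rw [hcons, pvRefFill_false_cons, hcf, hdrop]

theorem pvRefFill_false_false_cons (mgp : Int) (xs : List Bool) :
    pvRefFill mgp false (false :: xs) = false :: pvRefFill mgp false xs := by
  have h1 := pv_run_decomp (false :: xs)
  have hr := pv_rest_head (false :: xs)
  have hk : pvCountF (false :: xs) = pvCountF xs + 1 := rfl
  rw [pvRefFill_false_cons]
  simp only [Bool.false_and, Bool.false_eq_true, if_neg, ite_false]
  cases xs with
  | nil => simp [pvCountF, pvRefFill_nil]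
  | cons b ys =>
    cases b
    · have h2 := pv_run_decomp (false :: ys)
      have hr2 := pv_rest_head (false :: ys)
      rw [pvRefFill_false_cons (xs := ys)]
      simp only [Bool.false_and, Bool.false_eq_true, if_neg, ite_false]
      have : pvCountF (false :: false :: ys) = pvCountF (false :: ys) + 1 := rfl
      simp only [this, List.drop_succ_cons, List.replicate_succ, List.cons_append]
    · simp [pvCountF]

-- scan = index + length of the false run starting at index
theorem pvScanGap_eq (filled : List Bool) (index : Nat) :
    pvScanGap filled index = index + pvCountF (filled.drop index) := by
  rw [pvScanGap]
  split
  · rename_i hc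
    simp only [Bool.and_eq_true, Bool.not_eq_true', decide_eq_true_eq] at hc
    obtain ⟨h1, h2⟩ := hc
    have hd : filled.drop index = false :: filled.drop (index + 1) := by
      rw [List.drop_eq_getElem_cons h1]
      rw [List.getD_eq_getElem _ _ h1] at h2
      rw [h2]
    rw [hd]
    have := pvScanGap_eq filled (index + 1)
    simp only [pvCountF]
    omega
  · rename_i hc
    simp only [Bool.and_eq_true, Bool.not_eq_true', decide_eq_true_eq, not_and] at hc
    by_cases h1 : index < filled.length
    · have h2 := hc h1
      have hd : filled.drop index = true :: filled.drop (index + 1) := by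
        rw [List.drop_eq_getElem_cons h1]
        rw [List.getD_eq_getElem _ _ h1] at h2
        simp only [Bool.not_eq_false] at h2
        rw [h2]
      rw [hd]
      rfl
    · rw [List.drop_eq_nil_of_le (by omega)]
      rfl
termination_by filled.length - index
decreasing_by
  rename_i h; simp only [Bool.and_eq_true, decide_eq_true_eq] at h; omega

-- the patch loop rewrites positions i..i+k-1 to true
theorem pvPatch_eq (l : List Bool) (i k : Nat) (h : i + k ≤ l.length) :
    (List.range' i k).foldl (fun l j => l.set j true) l
      = l.take i ++ List.replicate k true ++ l.drop (i + k) := by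
  induction k generalizing i l with
  | zero => simp
  | succ k ih =>
    rw [List.range'_succ, List.foldl_cons]
    have hset : l.set i true = l.take i ++ true :: l.drop (i + 1) := by
      rw [List.set_eq_take_append_cons_drop, if_pos (by omega)]
    rw [ih (l.set i true) (i + 1) (by simp; omega)]
    rw [hset]
    have hti : (l.take i).length = i := by simp; omega
    rw [List.take_append, List.drop_append]
    simp only [hti]
    rw [List.take_of_length_le (by omega), List.drop_eq_nil_of_le (le_of_eq_of_le hti (by omega))]
    have e1 : i + 1 - i = 1 := by omega
    have e2 : i + 1 + k - i = k + 1 := by omega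
    rw [e1, e2]
    simp only [List.take_succ_cons, List.take_zero, List.drop_succ_cons, List.drop_drop,
      List.nil_append, List.replicate_succ, List.cons_append, List.append_assoc,
      List.singleton_append]
    have e3 : i + 1 + k = i + (k + 1) := by omega
    rw [e3]

theorem pvLoopA_eq (mgp : Int) (n : Nat) (filled : List Bool) (index : Nat)
    (hn : filled.length - index ≤ n) (hle : index ≤ filled.length) :
    pvLoopA mgp filled index
      = filled.take index
        ++ pvRefFill mgp (decide (index > 0) && filled.getD (index - 1) false)
             (filled.drop index) := by
  induction n generalizing filled index with
  | zero =>
    rw [pvLoopA, dif_neg (by omega)]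
    rw [List.drop_eq_nil_of_le (by omega), pvRefFill_nil, List.append_nil,
      List.take_of_length_le (by omega)]
  | succ n ih =>
    rw [pvLoopA]
    by_cases h : index < filled.length
    · rw [dif_pos h]
      by_cases hid : filled.getD index false = true
      · rw [if_pos hid]
        rw [ih filled (index + 1) (by omega) (by omega)]
        have hgi : filled[index] = true := by
          rw [List.getD_eq_getElem _ _ h] at hid; exact hid
        have hdrop : filled.drop index = true :: filled.drop (index + 1) := by
          rw [List.drop_eq_getElem_cons h, hgi]
        have htake : filled.take (index + 1) = filled.take index ++ [true] := by
          simp [List.take_succ, List.getElem?_eq_getElem h, hgi]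
        rw [hdrop, pvRefFill_true_cons, htake]
        have hp : (decide (index + 1 > 0) && filled.getD (index + 1 - 1) false) = true := by
          simp [List.getElem?_eq_getElem h, hgi, List.getD]
        rw [hp, List.append_assoc, List.singleton_append]
      · rw [if_neg hid]
        have hgd : filled.getD index false = false := by simpa using hid
        have hscan : pvScanGap filled index = index + pvCountF (filled.drop index) :=
          pvScanGap_eq filled index
        -- abbreviations
        set k := pvCountF (filled.drop index) with hkdef
        set rest := filled.drop (index + k) with hrest
        have hdd : (filled.drop index).drop k = rest := by
          rw [List.drop_drop, hrest]
        have hdropd : filled.drop index = List.replicate k false ++ rest := by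
          conv_lhs => rw [pv_run_decomp (filled.drop index)]
          rw [← hkdef, hdd]
        have hk1 : 1 ≤ k := by
          have : filled.drop index = false :: filled.drop (index + 1) := by
            rw [List.drop_eq_getElem_cons h]
            rw [List.getD_eq_getElem _ _ h] at hgd
            rw [hgd]
          rw [hkdef, this, pvCountF]; omega
        have hr : rest = [] ∨ ∃ t, rest = true :: t := by
          have := pv_rest_head (filled.drop index)
          rw [← hkdef, hdd] at this; exact this
        have hlend : (filled.drop index).length = filled.length - index := by simp
        have hkle : index + k ≤ filled.length := by
          have := pvCountF_le (filled.drop index)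
          rw [← hkdef] at this; omega
        -- right_active = !rest.isEmpty
        have hra : (decide (index + k < filled.length)
            && filled.getD (index + k) false) = !rest.isEmpty := by
          rcases hr with h0 | ⟨t, h0⟩
          · have : filled.length ≤ index + k := by
              have : rest.length = filled.length - (index + k) := by simp [hrest]
              rw [h0] at this; simp at this; omega
            simp [h0, Nat.not_lt.mpr this]
          · have hlt : index + k < filled.length := by
              have : rest.length = filled.length - (index + k) := by simp [hrest]
              rw [h0] at this; simp at this; omega
            have hd0 : List.drop (index + k) filled = true :: t := by rw [← hrest, h0]
            have h7 : filled[index + k]? = some true := by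
              have h8 := congrArg (fun l : List Bool => l[0]?) hd0
              simpa [List.getElem?_drop] using h8
            have h6 : filled[index + k] = true :=
              Option.some.inj ((List.getElem?_eq_getElem hlt).symm.trans h7)
            have : filled.getD (index + k) false = true := by
              simp [List.getD, List.getElem?_eq_getElem hlt, h6]
            simp [hlt, this, h0, h6]
        -- gap_size = k
        have hgs : index + k - 1 - index + 1 = k := by omega
        simp only [hscan, hgs, hra]
        -- the patch condition, shared with pvRefFill_run
        by_cases hc : (decide (index > 0) && filled.getD (index - 1) false
            && !rest.isEmpty && decide ((k : Int) ≤ mgp)) = true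
        · rw [if_pos hc]
          -- rest nonempty inside the patch branch
          obtain ⟨t, hrt⟩ : ∃ t, rest = true :: t := by
            rcases hr with h0 | h0
            · rw [h0] at hc; simp at hc
            · exact h0
          have hklt : index + k < filled.length := by
            have : rest.length = filled.length - (index + k) := by simp [hrest]
            rw [hrt] at this; simp at this; omega
          rw [pvPatch_eq filled index k (by omega)]
          set filled' := filled.take index ++ List.replicate k true ++ rest with hf'
          have hlen' : filled'.length = filled.length := by
            simp [hf', hrest]; omega
          have hpre : (filled.take index ++ List.replicate k true).length = index + k := by
            simp; omega
          have ht' : filled'.take (index + k) = filled.take index ++ List.replicate k true := by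
            rw [hf', List.append_assoc]
            rw [← List.append_assoc]
            exact List.take_left' hpre
          have hd' : filled'.drop (index + k) = rest := by
            rw [hf', List.append_assoc, ← List.append_assoc]
            exact List.drop_left' hpre
          have hg' : filled'.getD (index + k - 1) false = true := by
            have h1 : index + k - 1 < filled'.length := by omega
            have h2 : filled'[index + k - 1]? = some true := by
              rw [hf']
              rw [List.getElem?_append_left (by rw [List.length_append]; simp; omega)]
              rw [List.getElem?_append_right (by simp; omega)]
              have h3 : index + k - 1 - (List.take index filled).length = k - 1 := by
                simp; omega
              rw [h3, List.getElem?_replicate, if_pos (by omega)]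
            simp [List.getD, h2]
          rw [ih filled' (index + k) (by omega) (by omega)]
          rw [ht', hd', hg']
          have : (decide (index + k > 0) && true) = true := by simp; omega
          rw [this]
          rw [hdropd, pvRefFill_run mgp _ k rest hk1 hr, if_pos hc]
          simp [List.append_assoc]
        · rw [if_neg hc]
          rw [ih filled (index + k) (by omega) (by omega)]
          have hg'' : filled.getD (index + k - 1) false = false := by
            have h1 : index + k - 1 < filled.length := by omega
            have h2 : filled[index + k - 1]? = some false := by
              have h3 : filled[index + k - 1]? = (List.drop index filled)[k - 1]? := by
                rw [List.getElem?_drop]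
                congr 1; omega
              rw [h3, hdropd, List.getElem?_append_left (by simp; omega),
                List.getElem?_replicate, if_pos (by omega)]
            simp [List.getD, h2]
          rw [hg'']
          have : ((decide (index + k > 0) && false) : Bool) = false := by simp
          rw [this]
          have htk : filled.take (index + k) = filled.take index ++ List.replicate k false := by
            rw [List.take_add]
            congr 1
            rw [hdropd]
            exact List.take_left' (by simp)
          rw [htk, hdropd, pvRefFill_run mgp _ k rest hk1 hr, if_neg hc]
          simp only [List.append_assoc]
          rw [← hrest]
    · rw [dif_neg h]
      rw [List.drop_eq_nil_of_le (by omega), pvRefFill_nil, List.append_nil,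
        List.take_of_length_le (by omega)]

theorem pvA_eq_ref (active : List Bool) (mgp : Int) :
    fill_small_gaps_py active mgp = pvRefFill mgp false active := by
  unfold fill_small_gaps_py
  split
  · rename_i h; rw [h, pvRefFill_nil]
  · rw [pvLoopA_eq mgp active.length active 0 (by omega) (by omega)]
    simp

-- ---------- B side ----------

-- positions of the active samples, as Nats
def pvIdxN : List Bool → List Nat
  | [] => []
  | b :: xs => (if b then [0] else []) ++ (pvIdxN xs).map (· + 1)

-- one slice-assignment step of B, over Nat indices
def pvStepN (mgp : Int) (filled : List Bool) (p : Nat × Nat) : List Bool :=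
  if p.1 + 1 < p.2 ∧ ((p.2 - p.1 - 1 : Nat) : Int) ≤ mgp then
    filled.take (p.1 + 1) ++ List.replicate (p.2 - p.1 - 1) true ++ filled.drop p.2
  else filled

def pvPairs (l : List Bool) : List (Nat × Nat) := (pvIdxN l).zip (pvIdxN l).tail

def pvFoldB (mgp : Int) (l : List Bool) : List Bool := (pvPairs l).foldl (pvStepN mgp) l

theorem pvIdxN_false (xs : List Bool) : pvIdxN (false :: xs) = (pvIdxN xs).map (· + 1) := by
  simp [pvIdxN]

theorem pvIdxN_true (xs : List Bool) : pvIdxN (true :: xs) = 0 :: (pvIdxN xs).map (· + 1) := by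
  simp [pvIdxN]

theorem pvIdxN_replicate_false (k : Nat) (l : List Bool) :
    pvIdxN (List.replicate k false ++ l) = (pvIdxN l).map (· + k) := by
  induction k with
  | zero => simp
  | succ k ih =>
    rw [List.replicate_succ, List.cons_append, pvIdxN_false, ih, List.map_map]
    apply List.map_congr_left
    intro n _
    simp only [Function.comp_apply]
    omega

theorem pvMapShift (l : List Nat) (s : Int) :
    List.map (fun n : Nat => (n : Int) + s) (List.map (· + 1) l)
      = List.map (fun n : Nat => (n : Int) + (s + 1)) l := by
  rw [List.map_map]
  apply List.map_congr_left
  intro n _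
  simp [Function.comp]
  push_cast
  ring

theorem pvIdx_int (xs : List Bool) (s : Int) :
    ((PySem.List.enumerate xs s).filter (fun p => p.2)).map (fun p => p.1)
      = List.map (fun n : Nat => (n : Int) + s) (pvIdxN xs) := by
  induction xs generalizing s with
  | nil => simp [PySem.List.enumerate_nil, pvIdxN]
  | cons b xs ih =>
    rw [PySem.List.enumerate_cons, List.filter_cons]
    cases b
    · simp only [Bool.false_eq_true, if_false]
      rw [ih (s + 1), pvIdxN_false, pvMapShift]
    · have hb : ((s, true) : Int × Bool).2 = true := rfl
      rw [if_pos hb, List.map_cons, ih (s + 1), pvIdxN_true, List.map_cons, pvMapShift]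
      simp

theorem pvAlt_eq_foldB (active : List Bool) (mgp : Int) :
    fill_small_gaps_py_alt active mgp = pvFoldB mgp active := by
  simp only [fill_small_gaps_py_alt, pvFoldB, pvPairs]
  rw [pvIdx_int active 0]
  have h0 : (fun (n : Nat) => (n : Int) + 0) = (fun (n : Nat) => (n : Int)) := by
    funext n; ring
  rw [h0]
  have htail : (List.map (fun (n : Nat) => (n : Int)) (pvIdxN active)).tail
      = List.map (fun (n : Nat) => (n : Int)) (pvIdxN active).tail := by
    cases pvIdxN active <;> simp
  rw [htail, List.zip_map, List.foldl_map]
  congr 1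
  funext filled p
  obtain ⟨i, j⟩ := p
  simp only [Prod.map, pvStepN]
  by_cases hc : i + 1 < j ∧ ((j - i - 1 : Nat) : Int) ≤ mgp
  · rw [if_pos (by constructor <;> [omega; omega]), if_pos hc]
    have e1 : ((i : Int) + 1).toNat = i + 1 := by omega
    have e2 : ((j : Int) - i - 1).toNat = j - i - 1 := by omega
    have e3 : ((j : Int)).toNat = j := by omega
    rw [e1, e2, e3]
  · rw [if_neg (by omega), if_neg hc]

theorem pvStepN_cons (mgp : Int) (x : Bool) (f : List Bool) (i j : Nat) :
    pvStepN mgp (x :: f) (i + 1, j + 1) = x :: pvStepN mgp f (i, j) := by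
  simp only [pvStepN]
  have e : j + 1 - (i + 1) - 1 = j - i - 1 := by omega
  rw [e]
  by_cases hc : i + 1 < j ∧ ((j - i - 1 : Nat) : Int) ≤ mgp
  · rw [if_pos ⟨by omega, hc.2⟩, if_pos hc]
    simp [List.take_succ_cons, List.drop_succ_cons]
  · rw [if_neg (by omega), if_neg hc]

theorem pvFold_shift1 (mgp : Int) (ps : List (Nat × Nat)) (x : Bool) (f : List Bool) :
    (ps.map (fun p => (p.1 + 1, p.2 + 1))).foldl (pvStepN mgp) (x :: f)
      = x :: ps.foldl (pvStepN mgp) f := by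
  induction ps generalizing f with
  | nil => rfl
  | cons p ps ih => simp only [List.map_cons, List.foldl_cons, pvStepN_cons, ih]

theorem pvFold_shiftPre (mgp : Int) (pre : List Bool) (ps : List (Nat × Nat)) (f : List Bool) :
    (ps.map (fun p => (p.1 + pre.length, p.2 + pre.length))).foldl (pvStepN mgp) (pre ++ f)
      = pre ++ ps.foldl (pvStepN mgp) f := by
  induction pre generalizing ps with
  | nil => simp
  | cons x pre ih =>
    have hsplit : (fun (p : Nat × Nat) => (p.1 + (x :: pre).length, p.2 + (x :: pre).length))
        = (fun (p : Nat × Nat) => (p.1 + 1, p.2 + 1))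
          ∘ (fun (p : Nat × Nat) => (p.1 + pre.length, p.2 + pre.length)) := by
      funext p; simp [Function.comp]; omega
    rw [hsplit, ← List.map_map, List.cons_append, pvFold_shift1, ih]
    rfl

theorem pvPairs_false (xs : List Bool) :
    pvPairs (false :: xs) = (pvPairs xs).map (fun p => (p.1 + 1, p.2 + 1)) := by
  unfold pvPairs
  rw [pvIdxN_false]
  have htail : ((pvIdxN xs).map (· + 1)).tail = (pvIdxN xs).tail.map (· + 1) := by
    cases pvIdxN xs <;> simp
  rw [htail, List.zip_map]
  rfl

theorem pvFoldB_false (mgp : Int) (xs : List Bool) :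
    pvFoldB mgp (false :: xs) = false :: pvFoldB mgp xs := by
  unfold pvFoldB
  rw [pvPairs_false, pvFold_shift1]

theorem pvFoldB_true (mgp : Int) (n : Nat) :
    ∀ xs : List Bool, xs.length ≤ n →
      pvFoldB mgp (true :: xs) = true :: pvRefFill mgp true xs := by
  induction n with
  | zero =>
    intro xs hn
    have : xs = [] := by cases xs <;> simp_all
    subst this
    simp [pvFoldB, pvPairs, pvIdxN, pvRefFill_nil]
  | succ n ih =>
    intro xs hn
    set k := pvCountF xs with hkdef
    have hdec : xs = List.replicate k false ++ xs.drop k := pv_run_decomp xs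
    rcases pv_rest_head xs with h0 | ⟨t, h0⟩
    · -- no further active sample after the leading false run: nothing to zip with
      have hxs : xs = List.replicate k false := by
        conv_lhs => rw [hdec]
        rw [h0, List.append_nil]
      have hidx : pvIdxN xs = [] := by
        rw [hxs, ← List.append_nil (List.replicate k false), pvIdxN_replicate_false]
        simp [pvIdxN]
      have hlhs : pvFoldB mgp (true :: xs) = true :: xs := by
        unfold pvFoldB pvPairs
        rw [pvIdxN_true, hidx]
        rfl
      rw [hlhs]
      rcases Nat.eq_zero_or_pos k with hk | hk
      · have hxnil : xs = [] := by rw [hxs, hk]; rfl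
        rw [hxnil, pvRefFill_nil]
      · conv_lhs => rw [hxs]
        conv_rhs => rw [hxs, ← List.append_nil (List.replicate k false),
          pvRefFill_run mgp true k [] hk (Or.inl rfl)]
        simp [pvRefFill_nil]
    · -- xs = replicate k false ++ true :: t
      have hxs : xs = List.replicate k false ++ true :: t := by
        conv_lhs => rw [hdec]
        rw [h0]
      have hlt : t.length ≤ n := by
        have : xs.length = k + (t.length + 1) := by rw [hxs]; simp
        omega
      have ihA : (pvPairs (true :: t)).foldl (pvStepN mgp) (true :: t)
          = true :: pvRefFill mgp true t := ih t hlt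
      have hidx : pvIdxN xs = k :: List.map (fun n => n + 1 + k) (pvIdxN t) := by
        rw [hxs, pvIdxN_replicate_false, pvIdxN_true, List.map_cons, List.map_map]
        congr 1
        simp
      have hA : pvIdxN (true :: xs)
          = 0 :: (k + 1) :: List.map (fun n => n + 1 + (k + 1)) (pvIdxN t) := by
        rw [pvIdxN_true, hidx, List.map_cons, List.map_map]
        exact congrArg _ (congrArg _ (List.map_congr_left
          (by intro m _; simp only [Function.comp_apply]; omega)))
      have hM1 : ((k + 1 : Nat) :: List.map (fun n => n + 1 + (k + 1)) (pvIdxN t))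
          = List.map (fun n : Nat => n + (k + 1)) (0 :: List.map (· + 1) (pvIdxN t)) := by
        rw [List.map_cons, List.map_map]
        simp only [Nat.zero_add]
        exact congrArg _ (List.map_congr_left
          (by intro m _; simp only [Function.comp_apply]))
      have hM2 : List.map (fun n : Nat => n + 1 + (k + 1)) (pvIdxN t)
          = List.map (fun n : Nat => n + (k + 1)) (List.map (· + 1) (pvIdxN t)) := by
        rw [List.map_map]
        exact List.map_congr_left
          (by intro m _; simp only [Function.comp_apply])
      have hpairs : pvPairs (true :: xs)
          = (0, k + 1) :: (pvPairs (true :: t)).map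
              (fun p => (p.1 + (k + 1), p.2 + (k + 1))) := by
        unfold pvPairs
        rw [hA, pvIdxN_true (xs := t)]
        simp only [List.tail_cons, List.zip_cons_cons]
        congr 1
        rw [hM1, hM2, List.zip_map]
        apply List.map_congr_left
        intro p _
        simp [Prod.map]
      unfold pvFoldB
      rw [hpairs, List.foldl_cons]
      have hd : (true :: xs).drop (k + 1) = true :: t := by
        rw [List.drop_succ_cons, hxs, List.drop_left' (by simp)]
      by_cases hcond : 0 + 1 < k + 1 ∧ ((k + 1 - 0 - 1 : Nat) : Int) ≤ mgp
      · -- the leading gap of xs is filled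
        have hk1 : 1 ≤ k := by omega
        have hkm : ((k : Nat) : Int) ≤ mgp := by
          have := hcond.2
          have e : k + 1 - 0 - 1 = k := by omega
          rwa [e] at this
        have hstep : pvStepN mgp (true :: xs) (0, k + 1)
            = (true :: List.replicate k true) ++ (true :: t) := by
          unfold pvStepN
          rw [if_pos hcond]
          have e : k + 1 - 0 - 1 = k := by omega
          rw [e, hd]
          rfl
        rw [hstep]
        have hlen : (k + 1) = (true :: List.replicate k true).length := by simp
        conv_lhs => rw [hlen]
        rw [pvFold_shiftPre, ihA]
        conv_rhs => rw [hxs, pvRefFill_run mgp true k (true :: t) hk1 (Or.inr ⟨t, rfl⟩),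
          if_pos (by simp [hkm])]
        rw [pvRefFill_true_cons]
        simp
      · -- gap not filled (k = 0 or too large)
        have hstep : pvStepN mgp (true :: xs) (0, k + 1) = true :: xs := by
          unfold pvStepN
          rw [if_neg hcond]
        rw [hstep]
        have hsplit : (true : Bool) :: xs = (true :: List.replicate k false) ++ (true :: t) := by
          rw [hxs]
          rfl
        rw [hsplit]
        have hlen : (k + 1) = (true :: List.replicate k false).length := by simp
        conv_lhs => rw [hlen]
        rw [pvFold_shiftPre, ihA]
        rcases Nat.eq_zero_or_pos k with hk | hk
        · have hxt : xs = true :: t := by rw [hxs, hk]; rfl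
          rw [hxt, pvRefFill_true_cons, hk]
          rfl
        · have hkm : ¬ ((k : Nat) : Int) ≤ mgp := by
            intro hcon
            apply hcond
            constructor
            · omega
            · have e : k + 1 - 0 - 1 = k := by omega
              rw [e]
              exact hcon
          conv_rhs => rw [hxs, pvRefFill_run mgp true k (true :: t) hk (Or.inr ⟨t, rfl⟩),
            if_neg (by simp [hkm])]
          rw [pvRefFill_true_cons]
          simp

theorem pvFoldB_eq_ref (mgp : Int) (l : List Bool) :
    pvFoldB mgp l = pvRefFill mgp false l := by
  induction l with
  | nil => simp [pvFoldB, pvPairs, pvIdxN, pvRefFill_nil]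
  | cons b xs ih =>
    cases b
    · rw [pvFoldB_false, ih, pvRefFill_false_false_cons]
    · rw [pvFoldB_true mgp xs.length xs (le_refl _), pvRefFill_true_cons]

theorem pvB_eq_ref (active : List Bool) (mgp : Int) :
    fill_small_gaps_py_alt active mgp = pvRefFill mgp false active := by
  rw [pvAlt_eq_foldB, pvFoldB_eq_ref]

-- ===== VERDICT (by name: the statement is the Claim_ definition above) =====
theorem fill_small_gaps_py_spec : Claim_equal_fill_small_gaps_py := by
  intro active mgp _
  unfold Spec_fill_small_gaps_py
  rw [pvA_eq_ref, pvB_eq_ref]
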